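-- pv_equiv track=rewrite | github.com/Kohdz/Algorithms | AmazonOAII/subStringsOfSizeK.py | slidWindow
-- ===== SOURCE A (Python) =====
-- from collections import Counter
--
-- def slidWindow(word, K):
--
--     if len(word) < K:
--         return ""
--
--     left = 0
--     output = [] # also try set()
--     counter = Counter()
--
--     for right in range(len(word)):
--
--         currWord = word[right]
--         counter[currWord] += 1
--
--         while right - left + 1 > K:
--             leftWord = word[left]
--             counter[leftWord] -= 1
--
--             if not counter[leftWord]:
--                 del counter[leftWord]
--             left += 1
--
--         if len(counter) + 1 == K and right - left + 1 == K:
--             output.append(word[left: right + 1])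
--
--
--     return output
-- ===== SOURCE B (Python) =====
-- def slidWindow(word, K):
--     if len(word) < K:
--         return ""
--     if K <= 0:
--         return []
--     out = []
--     for i in range(len(word) - K + 1):
--         w = word[i:i + K]
--         if len(set(w)) == K - 1:
--             out.append(w)
--     return out
-- ===== Notes on version B (the rewrite author's own statement) =====
-- stated objective: simpler
-- what changed: A's incremental Counter with a shrink-loop sliding window is replaced by directly slicing each size-K window and testing len(set(w)) == K-1.
-- outside the precondition, e.g. on slidWindow('a', 2): A returns '', B returns ''; on slidWindow('', -1): A returns [], B returns []; on slidWindow('ab', -1): A raises IndexError, B returns []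
import Mathlib
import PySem

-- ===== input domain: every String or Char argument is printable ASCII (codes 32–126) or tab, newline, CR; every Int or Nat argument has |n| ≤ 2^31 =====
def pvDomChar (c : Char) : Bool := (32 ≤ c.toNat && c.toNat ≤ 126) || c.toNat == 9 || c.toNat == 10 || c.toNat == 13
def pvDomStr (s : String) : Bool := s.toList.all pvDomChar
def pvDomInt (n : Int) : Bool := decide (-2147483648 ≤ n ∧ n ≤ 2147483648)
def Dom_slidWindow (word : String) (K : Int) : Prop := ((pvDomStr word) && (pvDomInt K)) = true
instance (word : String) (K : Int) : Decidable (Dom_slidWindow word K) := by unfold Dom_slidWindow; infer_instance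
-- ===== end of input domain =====

-- B replaces A's incremental Counter/shrink sliding window by directly testing each size-K
-- slice for K-1 distinct characters (objective: simpler).

-- ===== PORT A =====
-- the inner `while` loop of A; fuel only makes the recursion total (left grows by 1 each
-- iteration, and Python raises IndexError at word[left] once left is out of range — the
-- `none` branch below marks that raise, reachable only outside Pre_).
def slidShrink (chars : List Char) (K right : Int) :
    Nat → Int → PySem.Dict Char Int → Int × PySem.Dict Char Int
  | 0, left, counter => (left, counter)
  | fuel+1, left, counter =>
    if right - left + 1 > K then
      match PySem.List.pyGet? chars left with
      | none => (left, counter)      -- Python raises IndexError here (outside Pre_)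
      | some leftWord =>
        let c1 := counter.modify leftWord 0 (· - 1)
        slidShrink chars K right fuel (left + 1)
          (if c1.getD leftWord 0 = 0 then c1.erase leftWord else c1)
    else (left, counter)

-- one iteration of A's `for right in range(len(word))` loop
def slidStep (chars : List Char) (K : Int)
    (st : Int × List String × PySem.Dict Char Int) (right : Int) :
    Int × List String × PySem.Dict Char Int :=
  let currWord := PySem.List.pyGetD chars right ' '   -- word[right]: right ∈ range(len(word)) is in range
  let counter := st.2.2.modify currWord 0 (· + 1)     -- counter[currWord] += 1
  let lc := slidShrink chars K right (chars.length + 1) st.1 counter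
  let output :=
    if (lc.2.size : Int) + 1 = K ∧ right - lc.1 + 1 = K then
      st.2.1 ++ [String.mk (PySem.List.slice chars (some lc.1) (some (right + 1)))]
    else st.2.1
  (lc.1, output, lc.2)

def slidWindow (word : String) (K : Int) : List String :=
  let chars := word.toList
  if (chars.length : Int) < K then
    []   -- Python returns "" here — a str, not a list of str; Pre_ excludes these inputs
  else
    ((PySem.List.pyRange 0 (chars.length : Int) 1).foldl (slidStep chars K)
      (0, [], PySem.Dict.empty)).2.1

-- ===== PORT B =====
-- one iteration of B's `for i in range(len(word) - K + 1)` loop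
def slidAltStep (chars : List Char) (K : Int) (out : List String) (i : Int) : List String :=
  let w := PySem.List.slice chars (some i) (some (i + K))
  if ((PySem.Set.ofList w).length : Int) = K - 1 then out ++ [String.mk w] else out

def slidWindow_alt (word : String) (K : Int) : List String :=
  let chars := word.toList
  if (chars.length : Int) < K then
    []   -- B's `return ""`: a str, not a list of str; Pre_ excludes these inputs
  else if K ≤ 0 then
    []   -- no window has K-1 distinct characters for K ≤ 0
  else
    (PySem.List.pyRange 0 ((chars.length : Int) - K + 1) 1).foldl (slidAltStep chars K) []

-- ===== PRECONDITION & SPEC =====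
-- Pre_ excludes (a) K < 0, where A raises IndexError on any nonempty word (and returns []
-- only on the empty word), and (b) len(word) < K, where A returns "" — a str, not a value
-- of the declared list-of-str type.
def Pre_slidWindow (word : String) (K : Int) : Prop :=
  0 ≤ K ∧ K ≤ (word.toList.length : Int)
instance (word : String) (K : Int) : Decidable (Pre_slidWindow word K) := by
  unfold Pre_slidWindow; infer_instance

def pvWitness_slidWindow : String × Int := ("aab", 2)

def Spec_slidWindow (word : String) (K : Int) (out : List String) : Prop :=
  out = slidWindow_alt word K
instance (word : String) (K : Int) (out : List String) : Decidable (Spec_slidWindow word K out) := by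
  unfold Spec_slidWindow; infer_instance

-- ===== CLAIM (what is proved, stated in full; the proofs are below) =====
def Claim_equal_slidWindow : Prop := ∀ (word : String) (K : Int),
  Dom_slidWindow word K → Pre_slidWindow word K → Spec_slidWindow word K (slidWindow word K)

-- ===== LEMMAS AND PROOFS =====

-- the window word[left:right+1] after processing rights 0..r-1 (left = r - k, clamped at 0)
def slwWin (chars : List Char) (k r : Nat) : List Char :=
  (chars.drop (r - k)).take (min r k)

-- the counter invariant: values are the window's multiplicities, keys its distinct chars
def slwInv (chars : List Char) (k r : Nat) (C : PySem.Dict Char Int) : Prop :=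
  C.keys.Nodup ∧
  (∀ c, C.getD c 0 = ((slwWin chars k r).count c : Int)) ∧
  (∀ c, c ∈ C.keys ↔ c ∈ slwWin chars k r)

-- B's partial output after the windows ending before r have been considered
def slwOutB (chars : List Char) (k r : Nat) : List String :=
  (PySem.List.pyRange 0 ((r : Int) - (k : Int) + 1) 1).foldl (slidAltStep chars (k : Int)) []


theorem slw_find_filter (x c : Char) (l : List (Char × Int)) :
    List.find? (fun p => p.1 == x) (l.filter fun p => !(p.1 == c)) =
      if x = c then none else List.find? (fun p => p.1 == x) l := by
  induction l with
  | nil => simp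
  | cons p l ih =>
    by_cases hpc : p.1 = c
    · by_cases hxc : x = c
      · simp [hpc, hxc, ih]
      · have h' : ¬ c = x := fun h => hxc h.symm
        simp [hpc, hxc, ih, h']
    · by_cases hpx : p.1 = x
      · have hxc : ¬ x = c := by rintro rfl; exact hpc hpx
        simp [hpc, hpx, hxc]
      · simp [hpc, hpx, ih]

theorem slw_getD_erase (d : PySem.Dict Char Int) (c x : Char) (v : Int) :
    (d.erase c).getD x v = if x = c then v else d.getD x v := by
  unfold PySem.Dict.erase PySem.Dict.getD PySem.Dict.get?
  rw [slw_find_filter]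
  by_cases h : x = c <;> simp [h]

theorem slw_keys_erase (d : PySem.Dict Char Int) (c : Char) :
    (d.erase c).keys = d.keys.filter (fun x => !(x == c)) := by
  unfold PySem.Dict.erase PySem.Dict.keys
  induction d.items with
  | nil => rfl
  | cons p l ih => by_cases h : p.1 = c <;> simp [List.filter_cons, h, ih]

theorem slw_size_eq (C : PySem.Dict Char Int) (w : List Char)
    (hnd : C.keys.Nodup) (hmem : ∀ c, c ∈ C.keys ↔ c ∈ w) :
    C.size = (PySem.Set.ofList w).length := by
  have hperm : C.keys.Perm (PySem.Set.ofList w) := by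
    rw [List.perm_ext_iff_of_nodup hnd (PySem.Set.nodup_ofList w)]
    intro a; rw [hmem, PySem.Set.mem_ofList]
  have h := hperm.length_eq
  simpa [PySem.Dict.keys, PySem.Dict.size] using h

theorem slwOutB_zero (chars : List Char) (k : Nat) : slwOutB chars k 0 = [] := by
  unfold slwOutB
  rcases Nat.eq_zero_or_pos k with hz | hp
  · subst hz
    rw [show ((0:Nat):Int) - ((0:Nat):Int) + 1 = 0 + 1 by norm_num,
        PySem.List.pyRange_one_singleton, List.foldl_cons, List.foldl_nil]
    simp only [slidAltStep]
    rw [if_neg (by omega)]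
  · rw [PySem.List.pyRange_one_eq_nil (by omega)]
    rfl

theorem slwOutB_succ_lt (chars : List Char) (k r : Nat) (h : r + 1 < k) :
    slwOutB chars k (r+1) = slwOutB chars k r := by
  unfold slwOutB
  rw [PySem.List.pyRange_one_eq_nil (by omega), PySem.List.pyRange_one_eq_nil (by omega)]

theorem slwOutB_succ_ge (chars : List Char) (k r : Nat) (h : k ≤ r + 1) :
    slwOutB chars k (r+1) =
      slidAltStep chars (k : Int) (slwOutB chars k r) ((r + 1 - k : Nat) : Int) := by
  unfold slwOutB
  have h1 : ((r+1 : Nat) : Int) - (k : Int) + 1 = ((r+1-k : Nat) : Int) + 1 := by omega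
  have h2 : ((r : Nat) : Int) - (k : Int) + 1 = ((r+1-k : Nat) : Int) := by omega
  rw [h1, PySem.List.pyRange_one_succ_right (Int.natCast_nonneg _),
      List.foldl_append, h2, List.foldl_cons, List.foldl_nil]

theorem slwWin_succ_lt (chars : List Char) (k r : Nat) (hr : r < chars.length)
    (h : r + 1 ≤ k) :
    slwWin chars k (r+1) = slwWin chars k r ++ [chars[r]] := by
  unfold slwWin
  rw [show r - k = 0 by omega, show r + 1 - k = 0 by omega,
      show min r k = r by omega, show min (r+1) k = r + 1 by omega,
      List.drop_zero, List.take_add_one, List.getElem?_eq_getElem hr]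
  rfl

theorem slwWin_succ_ge (chars : List Char) (k r : Nat) (hr : r < chars.length)
    (h : k ≤ r) :
    slwWin chars k r ++ [chars[r]] = chars[r-k]'(by omega) :: slwWin chars k (r+1) := by
  unfold slwWin
  rw [show min r k = k by omega, show min (r+1) k = k by omega]
  have h1 : (chars.drop (r-k)).take k ++ [chars[r]] = (chars.drop (r-k)).take (k+1) := by
    rw [List.take_add_one]
    have hg : (chars.drop (r-k))[k]? = some chars[r] := by
      rw [List.getElem?_drop, show r - k + k = r by omega, List.getElem?_eq_getElem hr]
    rw [hg]
    rfl
  have h2 : chars.drop (r-k) = chars[r-k]'(by omega) :: chars.drop (r+1-k) := by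
    rw [List.drop_eq_getElem_cons (by omega : r - k < chars.length),
        show r - k + 1 = r + 1 - k by omega]
  rw [h1, h2, List.take_succ_cons]

theorem slidShrink_stop (chars : List Char) (K right left : Int)
    (counter : PySem.Dict Char Int) (fuel : Nat) (h : ¬ right - left + 1 > K) :
    slidShrink chars K right (fuel+1) left counter = (left, counter) := by
  simp [slidShrink, h]

theorem slw_shrink (chars : List Char) (k r : Nat) (hr : r < chars.length) (hk : k ≤ r)
    (C : PySem.Dict Char Int) (fuel : Nat) :
    slidShrink chars (k : Int) (r : Int) (fuel+2) ((r - k : Nat) : Int) C =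
      (((r - k : Nat) : Int) + 1,
        if (C.modify (chars[r-k]'(by omega)) 0 (· - 1)).getD (chars[r-k]'(by omega)) 0 = 0
        then (C.modify (chars[r-k]'(by omega)) 0 (· - 1)).erase (chars[r-k]'(by omega))
        else C.modify (chars[r-k]'(by omega)) 0 (· - 1)) := by
  have hcond : (r : Int) - ((r - k : Nat) : Int) + 1 > (k : Int) := by omega
  have hget : PySem.List.pyGet? chars ((r - k : Nat) : Int) = some (chars[r-k]'(by omega)) := by
    rw [PySem.List.pyGet?_natCast, List.getElem?_eq_getElem (by omega : r - k < chars.length)]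
  rw [show fuel + 2 = (fuel + 1) + 1 by omega]
  simp only [slidShrink, if_pos hcond, hget]
  exact slidShrink_stop chars _ _ _ _ fuel (by omega)

theorem slw_step (chars : List Char) (k r : Nat) (hr : r < chars.length)
    (Out : List String) (C : PySem.Dict Char Int) (hinv : slwInv chars k r C) :
    ∃ C', slidStep chars (k : Int) (((r - k : Nat) : Int), Out, C) (r : Int)
        = (((r + 1 - k : Nat) : Int),
           (if k ≤ r + 1 then slidAltStep chars (k : Int) Out ((r + 1 - k : Nat) : Int)
            else Out),
           C')
      ∧ slwInv chars k (r+1) C' := by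
  obtain ⟨hnd, hcount, hmem⟩ := hinv
  have hcur : PySem.List.pyGetD chars (r : Int) ' ' = chars[r] := by
    rw [PySem.List.pyGetD_natCast, List.getD_eq_getElem chars ' ' hr]
  set C1 := C.modify chars[r] 0 (· + 1) with hC1
  have hC1count : ∀ c, C1.getD c 0 = ((slwWin chars k r ++ [chars[r]]).count c : Int) := by
    intro c
    rw [hC1, PySem.Dict.getD_modify]
    by_cases h : c = chars[r]
    · subst h
      rw [if_pos rfl, hcount, List.count_append]
      have h1 : List.count chars[r] [chars[r]] = 1 := by simp
      rw [h1]
      push_cast; ring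
    · rw [if_neg h, hcount, List.count_append]
      have h0 : List.count c [chars[r]] = 0 := by
        rw [List.count_eq_zero]
        simp [h]
      rw [h0]
      norm_num
  have hC1mem : ∀ c, c ∈ C1.keys ↔ c ∈ slwWin chars k r ++ [chars[r]] := by
    intro c
    rw [hC1, PySem.Dict.keys_modify, PySem.Dict.mem_keys_insert, List.mem_append,
        List.mem_singleton, hmem]
    tauto
  have hC1nd : C1.keys.Nodup := by
    rw [hC1, PySem.Dict.keys_modify]
    exact PySem.Dict.nodup_keys_insert _ _ _ hnd
  by_cases hk : k ≤ r
  · -- the while loop runs exactly once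
    have hwin := slwWin_succ_ge chars k r hr hk
    set a := chars[r-k]'(by omega) with ha
    set c1 := C1.modify a 0 (· - 1) with hc1
    have hc1count : ∀ c, c1.getD c 0 = ((slwWin chars k (r+1)).count c : Int) := by
      intro c
      rw [hc1, PySem.Dict.getD_modify]
      by_cases h : c = a
      · subst h
        rw [if_pos rfl, hC1count, hwin, List.count_cons_self]
        push_cast; ring
      · rw [if_neg h, hC1count, hwin, List.count_cons]
        have h' : ¬ a = c := fun hh => h hh.symm
        simp [h, h']
    have hc1mem : ∀ c, c ∈ c1.keys ↔ c ∈ a :: slwWin chars k (r+1) := by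
      intro c
      rw [hc1, PySem.Dict.keys_modify, PySem.Dict.mem_keys_insert, hC1mem, hwin,
          List.mem_cons]
      tauto
    have hc1nd : c1.keys.Nodup := by
      rw [hc1, PySem.Dict.keys_modify]
      exact PySem.Dict.nodup_keys_insert _ _ _ hC1nd
    set C2 := if c1.getD a 0 = 0 then c1.erase a else c1 with hC2
    have hinv' : slwInv chars k (r+1) C2 := by
      rw [hC2]
      split_ifs with h0
      · have hnotin : a ∉ slwWin chars k (r+1) := by
          rw [hc1count a] at h0
          intro hmem'
          have := List.count_pos_iff.2 hmem'
          omega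
        refine ⟨?_, ?_, ?_⟩
        · rw [slw_keys_erase]; exact hc1nd.filter _
        · intro c
          rw [slw_getD_erase]
          split_ifs with h
          · subst h
            have hz : (slwWin chars k (r+1)).count a = 0 := List.count_eq_zero.2 hnotin
            rw [hz]
            rfl
          · exact hc1count c
        · intro c
          rw [slw_keys_erase, List.mem_filter]
          constructor
          · rintro ⟨hc, hne⟩
            rcases List.mem_cons.1 ((hc1mem c).1 hc) with h | h
            · simp [h] at hne
            · exact h
          · intro hc
            refine ⟨(hc1mem c).2 (List.mem_cons.2 (Or.inr hc)), ?_⟩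
            simp only [Bool.not_eq_eq_eq_not, Bool.not_true, beq_eq_false_iff_ne, ne_eq]
            rintro rfl
            exact hnotin hc
      · have hin : a ∈ slwWin chars k (r+1) := by
          rw [hc1count a] at h0
          by_contra hmem'
          rw [List.count_eq_zero.2 hmem'] at h0
          exact h0 rfl
        refine ⟨hc1nd, hc1count, ?_⟩
        intro c
        rw [hc1mem c, List.mem_cons]
        constructor
        · rintro (rfl | hcw)
          · exact hin
          · exact hcw
        · exact Or.inr
    refine ⟨C2, ?_, hinv'⟩
    have hfuel : chars.length + 1 = (chars.length - 1) + 2 := by omega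
    simp only [slidStep, hcur]
    rw [hfuel, slw_shrink chars k r hr hk C1 (chars.length - 1), ← ha, ← hC2]
    have hsize : (C2.size : Int) = ((PySem.Set.ofList (slwWin chars k (r+1))).length : Int) :=
      by exact_mod_cast slw_size_eq C2 (slwWin chars k (r+1)) hinv'.1 hinv'.2.2
    have hleft : ((r - k : Nat) : Int) + 1 = ((r + 1 - k : Nat) : Int) := by omega
    have hslice : PySem.List.slice chars (some (((r - k : Nat) : Int) + 1))
        (some ((r : Int) + 1)) = slwWin chars k (r+1) := by
      rw [show ((r - k : Nat) : Int) + 1 = ((r + 1 - k : Nat) : Int) by omega,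
          show (r : Int) + 1 = ((r + 1 : Nat) : Int) by omega,
          PySem.List.slice_natCast]
      unfold slwWin
      rw [show r + 1 - (r + 1 - k) = k by omega, show min (r+1) k = k by omega]
    have hbslice : PySem.List.slice chars (some ((r + 1 - k : Nat) : Int))
        (some (((r + 1 - k : Nat) : Int) + (k : Int))) = slwWin chars k (r+1) := by
      rw [show ((r + 1 - k : Nat) : Int) + (k : Int) = ((r + 1 : Nat) : Int) by omega,
          PySem.List.slice_natCast]
      unfold slwWin
      rw [show r + 1 - (r + 1 - k) = k by omega, show min (r+1) k = k by omega]
    have hiff : (((C2.size : Int) + 1 = (k : Int)) ∧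
        ((r : Int) - (((r - k : Nat) : Int) + 1) + 1 = (k : Int))) ↔
        (((PySem.Set.ofList (slwWin chars k (r+1))).length : Int) = (k : Int) - 1) := by
      rw [hsize]; omega
    rw [if_pos (by omega : k ≤ r + 1)]
    simp only [slidAltStep]
    rw [hslice, hbslice, if_congr hiff rfl rfl, hleft]
  · -- r < k: the while loop does not run
    push_neg at hk
    have hwin := slwWin_succ_lt chars k r hr (by omega)
    have hinv' : slwInv chars k (r+1) C1 := by
      refine ⟨hC1nd, ?_, ?_⟩
      · intro c; rw [hwin]; exact hC1count c
      · intro c; rw [hwin]; exact hC1mem c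
    refine ⟨C1, ?_, hinv'⟩
    have hrk0 : r - k = 0 := by omega
    simp only [slidStep, hcur]
    rw [slidShrink_stop chars _ _ _ _ chars.length (by omega)]
    have hleft : ((r - k : Nat) : Int) = ((r + 1 - k : Nat) : Int) := by omega
    by_cases hk1 : k = r + 1
    · have hsize : (C1.size : Int) = ((PySem.Set.ofList (slwWin chars k (r+1))).length : Int) :=
        by exact_mod_cast slw_size_eq C1 (slwWin chars k (r+1)) hinv'.1 hinv'.2.2
      have hslice : PySem.List.slice chars (some ((r - k : Nat) : Int))
          (some ((r : Int) + 1)) = slwWin chars k (r+1) := by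
        rw [show (r : Int) + 1 = ((r + 1 : Nat) : Int) by omega, PySem.List.slice_natCast,
            show r - k = r + 1 - k by omega,
            show r + 1 - (r + 1 - k) = min (r+1) k by omega]
        unfold slwWin
        rfl
      have hbslice : PySem.List.slice chars (some ((r + 1 - k : Nat) : Int))
          (some (((r + 1 - k : Nat) : Int) + (k : Int))) = slwWin chars k (r+1) := by
        rw [show ((r + 1 - k : Nat) : Int) + (k : Int) = ((r + 1 : Nat) : Int) by omega,
            PySem.List.slice_natCast]
        unfold slwWin
        rw [show r + 1 - (r + 1 - k) = min (r+1) k by omega]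
      have hiff : (((C1.size : Int) + 1 = (k : Int)) ∧
          ((r : Int) - ((r - k : Nat) : Int) + 1 = (k : Int))) ↔
          (((PySem.Set.ofList (slwWin chars k (r+1))).length : Int) = (k : Int) - 1) := by
        rw [hsize]; omega
      rw [if_pos (by omega : k ≤ r + 1)]
      simp only [slidAltStep]
      rw [hslice, hbslice, if_congr hiff rfl rfl, hleft]
    · rw [if_neg (by rintro ⟨-, h2⟩; omega), if_neg (by omega : ¬ k ≤ r + 1), hleft]

theorem slwOutB_kzero (chars : List Char) (r : Nat) : slwOutB chars 0 r = [] := by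
  induction r with
  | zero => exact slwOutB_zero chars 0
  | succ r ih =>
    rw [slwOutB_succ_ge chars 0 r (by omega), ih]
    simp only [slidAltStep]
    rw [if_neg (by omega)]

theorem slw_main (chars : List Char) (k : Nat) (hk : k ≤ chars.length)
    (r : Nat) (hr : r ≤ chars.length) :
    ∃ C, (PySem.List.pyRange 0 (r : Int) 1).foldl (slidStep chars (k : Int))
          (0, [], PySem.Dict.empty)
        = (((r - k : Nat) : Int), slwOutB chars k r, C) ∧ slwInv chars k r C := by
  induction r with
  | zero =>
    refine ⟨PySem.Dict.empty, ?_, ?_, ?_, ?_⟩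
    · rw [PySem.List.pyRange_one_eq_nil (by omega), List.foldl_nil, slwOutB_zero]
      simp [Nat.zero_sub]
    · simp [PySem.Dict.keys, PySem.Dict.empty]
    · intro c
      simp [slwWin, PySem.Dict.getD_empty]
    · intro c
      simp [slwWin, PySem.Dict.keys, PySem.Dict.empty]
  | succ r ih =>
    obtain ⟨C, hfold, hinv⟩ := ih (by omega)
    obtain ⟨C', hstep, hinv'⟩ := slw_step chars k r (by omega) (slwOutB chars k r) C hinv
    refine ⟨C', ?_, hinv'⟩
    rw [show ((r + 1 : Nat) : Int) = (r : Int) + 1 by omega,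
        PySem.List.pyRange_one_succ_right (Int.natCast_nonneg _),
        List.foldl_append, hfold, List.foldl_cons, List.foldl_nil, hstep]
    by_cases h : k ≤ r + 1
    · rw [slwOutB_succ_ge chars k r h, if_pos h]
    · rw [slwOutB_succ_lt chars k r (by omega), if_neg h]

-- ===== VERDICT (by name: the statement is the Claim_ definition above) =====
theorem slidWindow_spec : Claim_equal_slidWindow := by
  intro word K hDom hPre
  obtain ⟨hK0, hKn⟩ := hPre
  unfold Spec_slidWindow slidWindow slidWindow_alt
  lift K to ℕ using hK0 with k
  have hk : k ≤ word.toList.length := by exact_mod_cast hKn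
  have hnot : ¬ ((word.toList.length : Int) < (k : Int)) := by exact_mod_cast not_lt.2 hKn
  simp only [hnot, if_false]
  obtain ⟨C, hfold, _⟩ := slw_main word.toList k hk word.toList.length le_rfl
  rw [hfold]
  rcases Nat.eq_zero_or_pos k with hz | hp
  · subst hz
    rw [if_pos (by omega : ((0:Nat):Int) ≤ 0)]
    exact slwOutB_kzero word.toList word.toList.length
  · rw [if_neg (by omega : ¬ ((k:Nat):Int) ≤ 0)]
    rfl
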